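-- pv_equiv track=rewrite | github.com/blankroad/agentic-dev-board | src/agentboard/analytics/overview_metrics.py | _convergence_from_decisions
-- ===== SOURCE A (Python) =====
-- from typing import Any
--
-- def _convergence_from_decisions(decisions: list[dict[str, Any]]) -> str:
--     for row in decisions:
--         if row.get("phase") == "approval" and row.get("verdict_source") == "PUSHED":
--             return "converged"
--     if any(r.get("phase") == "review" and r.get("verdict_source") == "PASS" for r in decisions):
--         return "review PASS"
--     if decisions:
--         return "in-progress"
--     return "n/a"
-- ===== SOURCE B (Python) =====
-- def _convergence_from_decisions(decisions: list) -> str: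
--     def rank(row) -> int:
--         if row.get("phase") == "approval" and row.get("verdict_source") == "PUSHED":
--             return 3
--         if row.get("phase") == "review" and row.get("verdict_source") == "PASS":
--             return 2
--         return 1
--     best = max(map(rank, decisions), default=0)
--     return ("n/a", "in-progress", "review PASS", "converged")[best]
-- ===== Notes on version B (the rewrite author's own statement) =====
-- stated objective: alternative
-- what changed: Replaced A's two condition scans and branch chain by mapping each row to a numeric severity rank, taking the maximum (0 for empty), and indexing a status table with it.
import Mathlib
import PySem

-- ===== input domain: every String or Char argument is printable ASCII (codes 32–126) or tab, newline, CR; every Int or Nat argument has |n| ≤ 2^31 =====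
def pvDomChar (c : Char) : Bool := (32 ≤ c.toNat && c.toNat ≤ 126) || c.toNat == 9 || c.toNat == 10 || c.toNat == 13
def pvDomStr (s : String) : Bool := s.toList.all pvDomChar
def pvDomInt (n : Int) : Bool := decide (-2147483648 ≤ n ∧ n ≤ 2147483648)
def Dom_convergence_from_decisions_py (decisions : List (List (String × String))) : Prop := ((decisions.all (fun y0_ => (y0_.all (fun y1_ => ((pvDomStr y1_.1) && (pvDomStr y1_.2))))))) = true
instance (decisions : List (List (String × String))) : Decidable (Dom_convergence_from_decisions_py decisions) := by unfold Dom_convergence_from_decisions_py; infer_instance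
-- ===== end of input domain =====

-- B: maps each row to a numeric severity rank, takes the maximum and indexes a status table,
-- instead of A's early-return scan plus any() plus branch chain (alternative decomposition, same cost).
-- ===== PORT A =====
def pvRowGet (row : List (String × String)) (k : String) : Option String :=
  (PySem.Dict.mk row).get? k

-- A's first loop with early return: some "converged" if a row matches, else none
def pvALoop : List (List (String × String)) → Option String
  | [] => none
  | row :: rest =>
      if pvRowGet row "phase" == some "approval" && pvRowGet row "verdict_source" == some "PUSHED" then
        some "converged"
      else pvALoop rest

def convergence_from_decisions_py (decisions : List (List (String × String))) : String :=
  match pvALoop decisions with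
  | some s => s
  | none =>
      if decisions.any (fun r => pvRowGet r "phase" == some "review" && pvRowGet r "verdict_source" == some "PASS") then
        "review PASS"
      else if !decisions.isEmpty then "in-progress"
      else "n/a"

-- ===== PORT B =====
def pvRank (row : List (String × String)) : Nat :=
  if pvRowGet row "phase" == some "approval" && pvRowGet row "verdict_source" == some "PUSHED" then 3
  else if pvRowGet row "phase" == some "review" && pvRowGet row "verdict_source" == some "PASS" then 2
  else 1

-- max(map(rank, decisions), default=0) then tuple indexing (index is always in range 0..3)
def convergence_from_decisions_py_alt (decisions : List (List (String × String))) : String :=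
  let best := (decisions.map pvRank).foldl Nat.max 0
  ["n/a", "in-progress", "review PASS", "converged"].getD best "n/a"

-- ===== PRECONDITION & SPEC =====
def Spec_convergence_from_decisions_py (decisions : List (List (String × String))) (out : String) : Prop := out = convergence_from_decisions_py_alt decisions
instance (decisions : List (List (String × String))) (out : String) : Decidable (Spec_convergence_from_decisions_py decisions out) := by unfold Spec_convergence_from_decisions_py; infer_instance

-- ===== CLAIM (what is proved, stated in full; the proofs are below) =====
def Claim_equal_convergence_from_decisions_py : Prop := ∀ (decisions : List (List (String × String))), Dom_convergence_from_decisions_py decisions → Spec_convergence_from_decisions_py decisions (convergence_from_decisions_py decisions)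

-- ===== LEMMAS AND PROOFS =====

def pvRowA (row : List (String × String)) : Bool :=
  pvRowGet row "phase" == some "approval" && pvRowGet row "verdict_source" == some "PUSHED"

def pvRowR (row : List (String × String)) : Bool :=
  pvRowGet row "phase" == some "review" && pvRowGet row "verdict_source" == some "PASS"

-- the maximum rank, characterised by the same case split A performs
def pvBestSpec (ds : List (List (String × String))) : Nat :=
  if ds.any pvRowA then 3 else if ds.any pvRowR then 2 else if ds.isEmpty then 0 else 1

theorem pvALoop_eq_any (ds : List (List (String × String))) :
    pvALoop ds = (if ds.any pvRowA then some "converged" else none) := by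
  induction ds with
  | nil => simp [pvALoop]
  | cons r rest ih =>
      simp only [pvALoop, List.any_cons, pvRowA]
      by_cases h : (pvRowGet r "phase" == some "approval" && pvRowGet r "verdict_source" == some "PUSHED") = true
      · simp [h]
      · simp [h, ih, pvRowA]

theorem pvBestSpec_cons (r : List (String × String)) (rest : List (List (String × String))) :
    pvBestSpec (r :: rest) = Nat.max (pvRank r) (pvBestSpec rest) := by
  rw [show pvRank r = (if pvRowA r then 3 else if pvRowR r then 2 else 1) from rfl]
  unfold pvBestSpec
  simp only [List.any_cons, List.isEmpty_cons]
  cases h1 : pvRowA r <;> cases h2 : pvRowR r <;>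
    (cases rest with
     | nil => simp
     | cons x xs =>
        cases hA : (x :: xs).any pvRowA <;> cases hR : (x :: xs).any pvRowR <;>
          simp [hA, hR, Nat.max_def])
theorem pvFold_eq_spec (ds : List (List (String × String))) (a : Nat) :
    (ds.map pvRank).foldl Nat.max a = Nat.max a (pvBestSpec ds) := by
  induction ds generalizing a with
  | nil => simp [pvBestSpec]
  | cons r rest ih =>
      simp only [List.map_cons, List.foldl_cons, ih, pvBestSpec_cons, Nat.max_assoc]

-- ===== VERDICT (by name: the statement is the Claim_ definition above) =====
theorem convergence_from_decisions_py_spec : Claim_equal_convergence_from_decisions_py := by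
  intro ds _
  unfold Spec_convergence_from_decisions_py convergence_from_decisions_py convergence_from_decisions_py_alt
  rw [pvALoop_eq_any, pvFold_eq_spec]
  rw [show (fun r => pvRowGet r "phase" == some "review" && pvRowGet r "verdict_source" == some "PASS") = pvRowR from rfl]
  unfold pvBestSpec
  cases hA : ds.any pvRowA <;> cases hR : ds.any pvRowR <;> cases hE : ds.isEmpty <;>
    simp [hA, hR, hE, Nat.max_def, List.getD]
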